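-- pv_equiv track=rewrite | github.com/jxtse/scientific-research-skills | skills/paper-fulltext-harvest/scripts/auto_paper_download/downloader.py | classify_publisher
-- ===== SOURCE A (Python) =====
-- WILEY_PREFIXES = ("10.1002", "10.1111")
--
-- ELSEVIER_PREFIXES = ("10.1016", "10.1011", "10.1006")  # 10.1006 = Academic Press (Elsevier acquired); 10.1011 rare
--
-- SPRINGER_PREFIXES = ("10.1007", "10.1038", "10.1186")
--
-- def classify_publisher(doi: str) -> str | None:
--     lowered = doi.lower()
--     if any(lowered.startswith(prefix) for prefix in WILEY_PREFIXES):
--         return "Wiley"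
--     if any(lowered.startswith(prefix) for prefix in ELSEVIER_PREFIXES):
--         return "Elsevier"
--     if any(lowered.startswith(prefix) for prefix in SPRINGER_PREFIXES):
--         return "Springer"
--     return "Crossref"
-- ===== SOURCE B (Python) =====
-- # Sorted table of (registrant prefix, publisher); binary search (lower bound)
-- # on the lowered 7-char prefix replaces A's three linear any()-scans.
-- _TABLE = [
--     ("10.1002", "Wiley"),
--     ("10.1006", "Elsevier"),
--     ("10.1007", "Springer"),
--     ("10.1011", "Elsevier"),
--     ("10.1016", "Elsevier"),
--     ("10.1038", "Springer"),
--     ("10.1111", "Wiley"),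
--     ("10.1186", "Springer"),
-- ]
--
-- def classify_publisher(doi: str) -> str | None:
--     key = doi.lower()[:7]
--     lo, hi = 0, len(_TABLE)
--     while lo < hi:
--         mid = (lo + hi) // 2
--         if _TABLE[mid][0] < key:
--             lo = mid + 1
--         else:
--             hi = mid
--     if lo < len(_TABLE) and _TABLE[lo][0] == key:
--         return _TABLE[lo][1]
--     return "Crossref"
-- ===== Notes on version B (the rewrite author's own statement) =====
-- stated objective: alternative
-- what changed: Replaced A's three sequential any()-over-prefix-tuple linear scans by a hand-written lower-bound binary search over one sorted (prefix, publisher) table keyed on the lowered DOI's first 7 characters.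
import Mathlib
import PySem

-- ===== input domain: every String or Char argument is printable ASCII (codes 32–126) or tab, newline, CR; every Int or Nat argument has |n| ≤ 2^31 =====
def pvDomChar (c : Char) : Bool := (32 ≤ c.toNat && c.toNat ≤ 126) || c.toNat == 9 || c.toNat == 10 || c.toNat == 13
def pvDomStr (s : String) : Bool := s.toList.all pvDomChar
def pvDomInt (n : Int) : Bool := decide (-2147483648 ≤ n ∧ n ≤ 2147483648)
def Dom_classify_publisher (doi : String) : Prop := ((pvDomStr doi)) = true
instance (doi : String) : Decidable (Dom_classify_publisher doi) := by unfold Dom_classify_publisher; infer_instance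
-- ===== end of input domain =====

-- B replaces A's three sequential any-prefix scans by a hand-written lower-bound binary
-- search over one sorted (prefix, publisher) table keyed on the lowered 7-char registrant
-- prefix (objective: alternative; same cost at this size).

-- ===== PORT A =====
def WILEY_PREFIXES : List String := ["10.1002", "10.1111"]
def ELSEVIER_PREFIXES : List String := ["10.1016", "10.1011", "10.1006"]
def SPRINGER_PREFIXES : List String := ["10.1007", "10.1038", "10.1186"]

def classify_publisher (doi : String) : String :=
  let lowered := PySem.Str.lower doi
  if WILEY_PREFIXES.any (fun p => PySem.Str.startswith lowered p) then "Wiley"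
  else if ELSEVIER_PREFIXES.any (fun p => PySem.Str.startswith lowered p) then "Elsevier"
  else if SPRINGER_PREFIXES.any (fun p => PySem.Str.startswith lowered p) then "Springer"
  else "Crossref"

-- ===== PORT B =====
def pvTableB : List (String × String) :=
  [("10.1002", "Wiley"), ("10.1006", "Elsevier"), ("10.1007", "Springer"),
   ("10.1011", "Elsevier"), ("10.1016", "Elsevier"), ("10.1038", "Springer"),
   ("10.1111", "Wiley"), ("10.1186", "Springer")]

-- the while loop of Source B; lo/hi are Nat (both stay in 0..len, so Python's '//2' is Nat '/');
-- the fuel argument (hi - lo at the call site) only makes the same loop structurally total;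
-- _TABLE[mid] is ported with getD — mid < hi ≤ len always holds, so the default is never read;
-- Python's str '<'/'==' are ported as code-point-lexicographic '<'/'=' on .toList (exact on ASCII
-- and beyond: both compare code points).
def pvBsGo (key : List Char) (fuel lo hi : Nat) : Nat :=
  match fuel with
  | 0 => lo
  | fuel + 1 =>
    if lo < hi then
      let mid := (lo + hi) / 2
      if (pvTableB.getD mid ("", "")).1.toList < key then pvBsGo key fuel (mid + 1) hi
      else pvBsGo key fuel lo mid
    else lo

def pvBsLoop (key : List Char) (lo hi : Nat) : Nat := pvBsGo key (hi - lo) lo hi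

def classify_publisher_alt (doi : String) : String :=
  let key := (PySem.Str.slice (PySem.Str.lower doi) none (some 7)).toList
  let lo := pvBsLoop key 0 pvTableB.length
  if lo < pvTableB.length ∧ (pvTableB.getD lo ("", "")).1.toList = key then
    (pvTableB.getD lo ("", "")).2
  else "Crossref"

-- ===== PRECONDITION & SPEC =====
def Spec_classify_publisher (doi : String) (out : String) : Prop := out = classify_publisher_alt doi
instance (doi : String) (out : String) : Decidable (Spec_classify_publisher doi out) := by unfold Spec_classify_publisher; infer_instance

-- ===== CLAIM =====
def Claim_equal_classify_publisher : Prop := ∀ (doi : String), Dom_classify_publisher doi → Spec_classify_publisher doi (classify_publisher doi)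

-- ===== LEMMAS AND PROOFS =====

-- startswith by a prefix is equality of the first |p| characters
theorem sw_take' (t p : List Char) : p.isPrefixOf t = decide (t.take p.length = p) := by
  rw [Bool.eq_iff_iff]
  simp only [List.isPrefixOf_iff_prefix, decide_eq_true_eq, List.prefix_iff_eq_take]
  exact eq_comm

theorem sw_take (t : List Char) (p : String) (h : p.toList.length = 7) :
    PySem.Chars.startswith t p.toList = decide (t.take 7 = p.toList) := by
  rw [← h]; exact sw_take' t p.toList

-- A as a chain of 7-char equality tests on the lowered list
theorem A_char (doi : String) :
    classify_publisher doi =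
      (let t := (PySem.Str.lower doi).toList.take 7
       if t = "10.1002".toList ∨ t = "10.1111".toList then "Wiley"
       else if t = "10.1016".toList ∨ t = "10.1011".toList ∨ t = "10.1006".toList then "Elsevier"
       else if t = "10.1007".toList ∨ t = "10.1038".toList ∨ t = "10.1186".toList then "Springer"
       else "Crossref") := by
  unfold classify_publisher WILEY_PREFIXES ELSEVIER_PREFIXES SPRINGER_PREFIXES
  simp only [List.any_cons, List.any_nil, PySem.Str.startswith_eq, Bool.or_false]
  rw [sw_take _ "10.1002" rfl, sw_take _ "10.1111" rfl, sw_take _ "10.1016" rfl,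
      sw_take _ "10.1011" rfl, sw_take _ "10.1006" rfl, sw_take _ "10.1007" rfl,
      sw_take _ "10.1038" rfl, sw_take _ "10.1186" rfl]
  simp only [Bool.or_eq_true, decide_eq_true_eq]

-- B's key is the lowered list's first 7 characters
theorem B_key (doi : String) :
    (PySem.Str.slice (PySem.Str.lower doi) none (some 7)).toList =
      (PySem.Str.lower doi).toList.take 7 := by
  simp [PySem.Str.slice, PySem.List.slice_to]

-- the binary search on the 8-entry table, unfolded into its full decision tree
theorem loop_tree (key : List Char) : pvBsLoop key 0 pvTableB.length =
    (if "10.1016".toList < key then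
       if "10.1111".toList < key then (if "10.1186".toList < key then 8 else 7)
       else (if "10.1038".toList < key then 6 else 5)
     else
       if "10.1007".toList < key then (if "10.1011".toList < key then 4 else 3)
       else if "10.1006".toList < key then 2
       else if "10.1002".toList < key then 1 else 0) := by
  simp [pvBsLoop, pvBsGo, pvTableB]
  rfl

-- ===== VERDICT =====
theorem classify_publisher_spec : Claim_equal_classify_publisher := by
  intro doi _
  unfold Spec_classify_publisher
  rw [A_char]
  unfold classify_publisher_alt
  rw [B_key]
  set t := (PySem.Str.lower doi).toList.take 7 with ht
  clear_value t
  by_cases h1 : t = ['1','0','.','1','0','0','2']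
  · subst h1; simp only [loop_tree]; decide
  by_cases h2 : t = ['1','0','.','1','1','1','1']
  · subst h2; simp only [loop_tree]; decide
  by_cases h3 : t = ['1','0','.','1','0','1','6']
  · subst h3; simp only [loop_tree]; decide
  by_cases h4 : t = ['1','0','.','1','0','1','1']
  · subst h4; simp only [loop_tree]; decide
  by_cases h5 : t = ['1','0','.','1','0','0','6']
  · subst h5; simp only [loop_tree]; decide
  by_cases h6 : t = ['1','0','.','1','0','0','7']
  · subst h6; simp only [loop_tree]; decide
  by_cases h7 : t = ['1','0','.','1','0','3','8']
  · subst h7; simp only [loop_tree]; decide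
  by_cases h8 : t = ['1','0','.','1','1','8','6']
  · subst h8; simp only [loop_tree]; decide
  -- key matches no table entry: A falls through to "Crossref", and B's final equality
  -- test is false at whatever index the search returned
  have hne : ∀ r : Nat, r < pvTableB.length → (pvTableB.getD r ("", "")).1.toList ≠ t := by
    intro r hlt heq
    have hlt8 : r < 8 := by simpa [pvTableB] using hlt
    interval_cases r <;> simp [pvTableB] at heq
    · exact h1 heq.symm
    · exact h5 heq.symm
    · exact h6 heq.symm
    · exact h4 heq.symm
    · exact h3 heq.symm
    · exact h7 heq.symm
    · exact h2 heq.symm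
    · exact h8 heq.symm
  have hA : (if t = "10.1002".toList ∨ t = "10.1111".toList then "Wiley"
       else if t = "10.1016".toList ∨ t = "10.1011".toList ∨ t = "10.1006".toList then "Elsevier"
       else if t = "10.1007".toList ∨ t = "10.1038".toList ∨ t = "10.1186".toList then "Springer"
       else ("Crossref" : String)) = "Crossref" := by
    simp [h1, h2, h3, h4, h5, h6, h7, h8]
  rw [hA]
  show ("Crossref" : String) =
    (if pvBsLoop t 0 pvTableB.length < pvTableB.length ∧
        (pvTableB.getD (pvBsLoop t 0 pvTableB.length) ("", "")).1.toList = t then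
      (pvTableB.getD (pvBsLoop t 0 pvTableB.length) ("", "")).2
    else "Crossref")
  rw [if_neg (fun hc => hne _ hc.1 hc.2)]
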